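-- pv_equiv track=rewrite | github.com/gphil/telliot-feeds | src/telliot_feeds/reporters/tip_listener/utils_tip_listener.py | filter_batch_result
-- ===== SOURCE A (Python) =====
-- from collections import defaultdict
-- from typing import Any
-- from typing import Dict
-- from typing import List
--
-- def filter_batch_result(data: Dict[Any, Any]) -> defaultdict[Any, List[Any]]:
--     """Filter data dictionary with tuple key
--
--     >>> example {(current_value, queryid): 0, (current_timestamp, queryid): 123}
--     to {query: [0, 123]}
--
--     Args:
--     - data: dictionary
--
--     Return:
--     - dictionary with value of list type
--     """
--     mapping = defaultdict(list)
--     results = defaultdict(list)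
--
--     for k in data:
--         mapping[k[1]].append(k)
--     for query_id in mapping:
--         for val in mapping[query_id]:
--             value = data[val]
--             results[query_id].append(value)
--
--     return results
-- ===== SOURCE B (Python) =====
-- from collections import defaultdict
-- from typing import Any
-- from typing import Dict
-- from typing import List
--
--
-- def filter_batch_result(data: Dict[Any, Any]) -> defaultdict[Any, List[Any]]:
--     """Group-major rebuild: list the distinct second key components in first-appearance
--     order, then for each one collect its whole value list with a scan of the items."""
--     results = defaultdict(list)
--     for q in dict.fromkeys(k[1] for k in data):
--         results[q] = [v for k, v in data.items() if k[1] == q]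
--     return results
-- ===== Notes on version B (the rewrite author's own statement) =====
-- stated objective: alternative
-- what changed: B inverts the traversal: instead of A's per-item index-building pass plus a second lookup pass, B first computes the ordered distinct group keys (dict.fromkeys) and then, group-major, rebuilds each group's value list with a full scan of the items per group key; no intermediate key index is kept.
import Mathlib
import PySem

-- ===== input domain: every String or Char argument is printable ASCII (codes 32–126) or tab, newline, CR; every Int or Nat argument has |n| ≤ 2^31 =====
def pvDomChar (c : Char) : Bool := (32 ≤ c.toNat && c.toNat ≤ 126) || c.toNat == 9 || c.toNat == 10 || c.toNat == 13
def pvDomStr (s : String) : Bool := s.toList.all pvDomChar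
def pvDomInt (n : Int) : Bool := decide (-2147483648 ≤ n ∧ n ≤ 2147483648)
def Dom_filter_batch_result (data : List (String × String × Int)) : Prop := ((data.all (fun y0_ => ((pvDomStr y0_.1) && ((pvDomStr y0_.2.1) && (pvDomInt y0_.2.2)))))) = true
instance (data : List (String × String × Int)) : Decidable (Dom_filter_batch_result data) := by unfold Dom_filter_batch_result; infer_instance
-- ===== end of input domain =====

-- B inverts A's traversal: ordered distinct group keys first, then one scan of the
-- items per group key to rebuild its value list (objective: alternative, same result).
-- The Python argument is a dict keyed by (str, str) pairs; following the type
-- convention each port first rebuilds that dict as a PySem.Dict from the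
-- association list (insertion order, duplicate keys overwrite in place —
-- exactly Python's dict construction), then runs its algorithm on it.

-- ===== PORT A =====
def filter_batch_result (data : List (String × String × Int)) : List (String × List Int) :=
  let d : PySem.Dict (String × String) Int :=
    PySem.Dict.ofList (data.map (fun p => ((p.1, p.2.1), p.2.2)))
  -- for k in data: mapping[k[1]].append(k)
  let mapping : PySem.Dict String (List (String × String)) :=
    d.keys.foldl (fun m k => m.modify k.2 [] (fun l => l ++ [k])) PySem.Dict.empty
  -- for query_id in mapping: for val in mapping[query_id]: results[query_id].append(data[val])
  -- data[val] never raises: val was taken from d.keys, so the getD default 0 is never used.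
  let results : PySem.Dict String (List Int) :=
    mapping.keys.foldl
      (fun r query_id =>
        (mapping.getD query_id []).foldl
          (fun r val => r.modify query_id [] (fun l => l ++ [d.getD val 0])) r)
      PySem.Dict.empty
  results.items

-- ===== PORT B =====
def filter_batch_result_alt (data : List (String × String × Int)) : List (String × List Int) :=
  let d : PySem.Dict (String × String) Int :=
    PySem.Dict.ofList (data.map (fun p => ((p.1, p.2.1), p.2.2)))
  -- for q in dict.fromkeys(k[1] for k in data): results[q] = [v for k, v in data.items() if k[1] == q]
  let qs : List String := PySem.List.dedup (d.keys.map (fun k => k.2))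
  (qs.foldl
      (fun r q => r.insert q ((d.items.filter (fun p => p.1.2 == q)).map (fun p => p.2)))
      PySem.Dict.empty).items

-- ===== PRECONDITION & SPEC =====
def Spec_filter_batch_result (data : List (String × String × Int)) (out : List (String × List Int)) : Prop := out = filter_batch_result_alt data
instance (data : List (String × String × Int)) (out : List (String × List Int)) : Decidable (Spec_filter_batch_result data out) := by unfold Spec_filter_batch_result; infer_instance

-- ===== CLAIM (what is proved, stated in full; the proofs are below) =====
def Claim_equal_filter_batch_result : Prop := ∀ (data : List (String × String × Int)), Dom_filter_batch_result data → Spec_filter_batch_result data (filter_batch_result data)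

-- ===== LEMMAS AND PROOFS =====

-- Set.update on a cons head not occurring in the updating list commutes with cons.
theorem pv_update_cons_not_mem {α : Type} [BEq α] [LawfulBEq α]
    (ys : List α) (x : α) (s : List α) (h : x ∉ ys) :
    PySem.Set.update (x :: s) ys = x :: PySem.Set.update s ys := by
  induction ys generalizing s with
  | nil => simp [PySem.Set.update_nil]
  | cons y ys ih =>
    have hxy : y ≠ x := fun he => h (by simp [he])
    have hadd : PySem.Set.add (x :: s) y = x :: PySem.Set.add s y := by
      rw [PySem.Set.add_eq_ite, PySem.Set.add_eq_ite]
      by_cases hm : y ∈ s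
      · simp [hm, List.mem_cons, hxy]
      · simp [hm, List.mem_cons, hxy]
    rw [PySem.Set.update_cons, PySem.Set.update_cons, hadd,
      ih _ (fun hm => h (by simp [hm]))]

-- set() of a nonempty constant list is the singleton.
theorem pv_ofList_const {α β : Type} [BEq α] [LawfulBEq α]
    (l : List β) (q : α) (h : l ≠ []) :
    PySem.Set.ofList (l.map (fun _ => q)) = [q] := by
  induction l with
  | nil => exact absurd rfl h
  | cons a l ih =>
    rw [List.map_cons, PySem.Set.ofList_cons]
    by_cases hl : l = []
    · subst hl; simp [PySem.Set.ofList_nil, PySem.Set.discard]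
    · rw [ih hl]; simp [PySem.Set.discard]

-- A nested append-to-key fold is the flat fold over the tagged concatenation.
theorem pv_nested_foldl_eq {κ β : Type} (qs : List String) (G : String → List κ)
    (h : κ → β) (r0 : PySem.Dict String (List β)) :
    qs.foldl
      (fun r q => (G q).foldl (fun r v => r.modify q [] (fun l => l ++ [h v])) r) r0
    = (qs.flatMap (fun q => (G q).map (fun v => (q, h v)))).foldl
        (fun r p => r.modify p.1 [] (fun l => l ++ [p.2])) r0 := by
  induction qs generalizing r0 with
  | nil => rfl
  | cons q qs ih =>
    rw [List.foldl_cons, List.flatMap_cons, List.foldl_append, ih, List.foldl_map]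

-- Filtering the tagged concatenation over distinct tags keeps exactly one chunk.
theorem pv_filter_flat {κ β : Type} (qs : List String) (G : String → List κ)
    (h : κ → β) (q : String) (hnd : qs.Nodup) :
    List.filter (fun p => p.1 == q)
        (qs.flatMap (fun q' => (G q').map (fun v => (q', h v))))
    = if q ∈ qs then (G q).map (fun v => (q, h v)) else [] := by
  induction qs with
  | nil => simp
  | cons a qs ih =>
    rw [List.flatMap_cons, List.filter_append, ih hnd.of_cons]
    have hchunk : List.filter (fun p => p.1 == q) ((G a).map (fun v => (a, h v)))
        = if a = q then (G a).map (fun v => (a, h v)) else [] := by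
      by_cases ha : a = q
      · rw [if_pos ha]
        apply List.filter_eq_self.mpr
        intro p hp
        rcases List.mem_map.mp hp with ⟨v, _, rfl⟩
        simp [ha]
      · rw [if_neg ha]
        apply List.filter_eq_nil_iff.mpr
        intro p hp
        rcases List.mem_map.mp hp with ⟨v, _, rfl⟩
        simp [ha]
    rw [hchunk]
    by_cases ha : a = q
    · subst ha
      have hq : a ∉ qs := (List.nodup_cons.mp hnd).1
      simp [hq]
    · have haq : q ≠ a := fun e => ha e.symm
      by_cases hm : q ∈ qs <;> simp [List.mem_cons, hm, ha, haq]

-- set() of the tags of the tagged concatenation (nonempty chunks, distinct tags) is the tag list.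
theorem pv_ofList_flat_fst {κ β : Type} (qs : List String) (G : String → List κ)
    (h : κ → β) (hnd : qs.Nodup) (hne : ∀ q ∈ qs, G q ≠ []) :
    PySem.Set.ofList
      ((qs.flatMap (fun q' => (G q').map (fun v => (q', h v)))).map (fun p => p.1)) = qs := by
  induction qs with
  | nil => simp [PySem.Set.ofList_nil]
  | cons a qs ih =>
    rw [List.flatMap_cons, List.map_append]
    have hchunk : ((G a).map (fun v => (a, h v))).map (fun p => p.1)
        = (G a).map (fun _ => a) := by
      rw [List.map_map]
      exact List.map_congr_left (fun v _ => rfl)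
    rw [hchunk, PySem.Set.ofList_append, pv_ofList_const _ _ (hne a (by simp))]
    have hrest := ih hnd.of_cons (fun q hq => hne q (by simp [hq]))
    have hnotin : a ∉ (qs.flatMap (fun q' => (G q').map (fun v => (q', h v)))).map
        (fun p => p.1) := by
      intro hm
      rcases List.mem_map.mp hm with ⟨p, hp, hp1⟩
      rcases List.mem_flatMap.mp hp with ⟨q', hq', hpq⟩
      rcases List.mem_map.mp hpq with ⟨v, _, hveq⟩
      have hqa : q' = a := by rw [← hp1, ← hveq]
      exact (List.nodup_cons.mp hnd).1 (hqa ▸ hq')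
    rw [pv_update_cons_not_mem _ _ _ hnotin]
    have hupd : PySem.Set.update ([] : PySem.Set String)
        ((qs.flatMap (fun q' => (G q').map (fun v => (q', h v)))).map (fun p => p.1))
        = PySem.Set.ofList
            ((qs.flatMap (fun q' => (G q').map (fun v => (q', h v)))).map (fun p => p.1)) := by
      rw [PySem.Set.ofList_eq_foldl]; rfl
    rw [hupd, hrest]

-- An append-to-key fold from the empty dict, characterized: its items list is the
-- ordered distinct key list paired with each key's filtered value sequence.
theorem pv_char {β : Type} (L : List (String × β)) :
    (L.foldl (fun r p => r.modify p.1 [] (fun l => l ++ [p.2])) PySem.Dict.empty).items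
    = (PySem.Set.ofList (L.map (fun p => p.1))).map
        (fun q => (q, (L.filter (fun p => p.1 == q)).map (fun p => p.2))) := by
  have nd : (L.foldl (fun r p => r.modify p.1 [] (fun l => l ++ [p.2]))
      PySem.Dict.empty).keys.Nodup :=
    PySem.Dict.nodup_keys_foldl_modify_key L (fun p => p.1) [] (fun _ p => (fun l => l ++ [p.2]))
      PySem.Dict.empty (by rw [PySem.Dict.keys_empty]; exact List.nodup_nil)
  have hkeys : (L.foldl (fun r p => r.modify p.1 [] (fun l => l ++ [p.2]))
      PySem.Dict.empty).keys = PySem.Set.ofList (L.map (fun p => p.1)) := by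
    rw [PySem.Dict.keys_foldl_modify_key L (fun p => p.1) [] (fun _ p => (fun l => l ++ [p.2])),
      PySem.Dict.keys_empty, PySem.Set.ofList_eq_foldl]; rfl
  rw [PySem.Dict.items_eq_map_keys _ nd [], hkeys]
  apply List.map_congr_left
  intro q _
  rw [PySem.Dict.getD_foldl_modify_append, PySem.Dict.getD_empty, List.nil_append]

-- The two ports' computations agree for any input dict with distinct keys
-- (every PySem.Dict built by ofList has distinct keys).
theorem pv_main (d : PySem.Dict (String × String) Int) (hnd : d.keys.Nodup) :
    ((d.keys.foldl (fun m k => m.modify k.2 [] (fun l => l ++ [k])) PySem.Dict.empty).keys.foldl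
      (fun r query_id =>
        ((d.keys.foldl (fun m k => m.modify k.2 [] (fun l => l ++ [k])) PySem.Dict.empty).getD
            query_id []).foldl
          (fun r val => r.modify query_id [] (fun l => l ++ [d.getD val 0])) r)
      PySem.Dict.empty).items
    = ((PySem.List.dedup (d.keys.map (fun k => k.2))).foldl
        (fun r q => r.insert q ((d.items.filter (fun p => p.1.2 == q)).map (fun p => p.2)))
        PySem.Dict.empty).items := by
  set mapping : PySem.Dict String (List (String × String)) :=
    d.keys.foldl (fun m k => m.modify k.2 [] (fun l => l ++ [k])) PySem.Dict.empty with hmap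
  have hmapfold : mapping
      = (d.keys.map (fun k => (k.2, k))).foldl
          (fun m p => m.modify p.1 [] (fun l => l ++ [p.2])) PySem.Dict.empty := by
    rw [hmap, List.foldl_map]
  have mkeys : mapping.keys = PySem.Set.ofList (d.keys.map (fun k => k.2)) := by
    rw [hmap, PySem.Dict.keys_foldl_modify_key d.keys (fun k => k.2) []
      (fun _ k => (fun l => l ++ [k]))]
    rw [PySem.Dict.keys_empty, PySem.Set.ofList_eq_foldl]; rfl
  have mnodup : mapping.keys.Nodup := by rw [mkeys]; exact PySem.Set.nodup_ofList _
  have mget : ∀ q, mapping.getD q [] = d.keys.filter (fun k => k.2 == q) := by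
    intro q
    rw [hmapfold, PySem.Dict.getD_foldl_modify_append, PySem.Dict.getD_empty, List.nil_append,
      List.filter_map]
    simp [Function.comp_def]
  have hkeysitems : d.keys = d.items.map (fun p => p.1) := rfl
  have hne : ∀ q ∈ mapping.keys, mapping.getD q [] ≠ [] := by
    intro q hq
    rw [mkeys] at hq
    rcases List.mem_map.mp ((PySem.Set.mem_ofList _ _).mp hq) with ⟨k, hk, hk2⟩
    have hkf : k ∈ d.keys.filter (fun k => k.2 == q) :=
      List.mem_filter.mpr ⟨hk, by simp [hk2]⟩
    rw [mget]
    exact List.ne_nil_of_mem hkf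
  -- A's nested result loop as a flat fold over tagged pairs, then its characterization
  rw [pv_nested_foldl_eq mapping.keys (fun q => mapping.getD q []) (fun v => d.getD v 0)
    PySem.Dict.empty, pv_char]
  -- B's insert loop over fresh distinct keys from the empty dict appends in order
  rw [PySem.Dict.items_foldl_insert_fresh (PySem.List.dedup (d.keys.map (fun k => k.2)))
    (fun q => q) (fun q => (d.items.filter (fun p => p.1.2 == q)).map (fun p => p.2))
    PySem.Dict.empty (fun _ _ => PySem.Dict.contains_empty _)
    (by simp)]
  rw [show (PySem.Dict.empty : PySem.Dict String (List Int)).items = [] from rfl, List.nil_append]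
  -- both sides are maps over the same ordered distinct key list
  rw [pv_ofList_flat_fst mapping.keys (fun q => mapping.getD q []) (fun v => d.getD v 0)
    mnodup hne, PySem.List.dedup_eq_ofList, ← mkeys]
  apply List.map_congr_left
  intro q hq
  rw [pv_filter_flat mapping.keys (fun q => mapping.getD q []) (fun v => d.getD v 0) q mnodup,
    if_pos hq, List.map_map]
  refine congrArg (fun l => (q, l)) ?_
  rw [mget q, hkeysitems, List.filter_map]
  simp only [List.map_map, Function.comp_def]
  apply List.map_congr_left
  intro p hp
  exact PySem.Dict.getD_of_mem_items _ (List.mem_of_mem_filter hp) hnd 0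

-- ===== VERDICT (by name: the statement is the Claim_ definition above) =====
set_option maxHeartbeats 1600000 in
theorem filter_batch_result_spec : Claim_equal_filter_batch_result := by
  intro data _
  unfold Spec_filter_batch_result filter_batch_result filter_batch_result_alt
  exact pv_main (PySem.Dict.ofList (data.map (fun p => ((p.1, p.2.1), p.2.2))))
    (PySem.Dict.nodup_keys_ofList _)
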